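-- pv_equiv track=rewrite | github.com/aprimc/discretaly | part8.py | _all_frequencies
-- ===== SOURCE A (Python) =====
-- def _all_frequencies(w, m, ks):
--     k = min(m, ks[0])
--     for f0 in range(k + 1):
--         if w == 1:
--             yield [f0]
--         else:
--             for fs in _all_frequencies(w - 1, max(0, k - f0), ks[1:]):
--                 yield [f0] + fs
-- ===== SOURCE B (Python) =====
-- def _all_frequencies(w, m, ks):
--     # breadth-first iterative expansion: keep a frontier of (prefix, remaining-budget)
--     # pairs and grow every prefix by one position per loop iteration.
--     if w < 1 or w > len(ks):
--         return
--     frontier = [([], m)]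
--     for k in ks[:w]:
--         frontier = [(p + [x], min(b, k) - x)
--                     for (p, b) in frontier
--                     for x in range(min(b, k) + 1)]
--     for p, _ in frontier:
--         yield p
-- ===== Notes on version B (the rewrite author's own statement) =====
-- stated objective: alternative
-- what changed: Replaces A's depth-first recursive generator by an iterative breadth-first expansion: a frontier of (prefix, remaining-budget) pairs grown one position per loop iteration over ks[:w], with no recursion.
import Mathlib
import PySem

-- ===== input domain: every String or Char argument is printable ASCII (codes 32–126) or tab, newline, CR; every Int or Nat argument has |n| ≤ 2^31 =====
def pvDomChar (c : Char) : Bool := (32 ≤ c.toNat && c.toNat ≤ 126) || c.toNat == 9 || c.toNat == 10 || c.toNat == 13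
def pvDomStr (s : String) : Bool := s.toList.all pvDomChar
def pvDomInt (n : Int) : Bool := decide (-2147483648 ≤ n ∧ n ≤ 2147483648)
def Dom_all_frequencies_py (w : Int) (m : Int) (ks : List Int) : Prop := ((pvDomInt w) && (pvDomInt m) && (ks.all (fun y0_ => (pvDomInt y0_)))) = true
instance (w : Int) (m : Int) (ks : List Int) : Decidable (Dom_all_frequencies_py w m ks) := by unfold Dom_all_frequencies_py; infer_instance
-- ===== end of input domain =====

-- B replaces A's depth-first recursive generator by an iterative breadth-first
-- frontier expansion (alternative decomposition, same cost); equivalence is about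
-- the list of yielded vectors.

-- ===== PORT A =====
-- literal transliteration of A; where Python raises IndexError (ks exhausted) the
-- port returns [] — exactly those inputs are excluded by Pre_ below.
def all_frequencies_py (w : Int) (m : Int) (ks : List Int) : List (List Int) :=
  match ks with
  | [] => []  -- Python: ks[0] raises IndexError
  | k0 :: rest =>
    let k := min m k0
    (PySem.List.pyRange 0 (k + 1) 1).flatMap (fun f0 =>
      if w = 1 then [[f0]]
      else (all_frequencies_py (w - 1) (max 0 (k - f0)) rest).map (fun fs => f0 :: fs))

-- ===== PORT B =====
-- one expansion step of Source B's loop body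
def pvStep (frontier : List (List Int × Int)) (k : Int) : List (List Int × Int) :=
  frontier.flatMap (fun pb =>
    (PySem.List.pyRange 0 (min pb.2 k + 1) 1).map (fun x => (pb.1 ++ [x], min pb.2 k - x)))

def all_frequencies_py_alt (w : Int) (m : Int) (ks : List Int) : List (List Int) :=
  if w < 1 ∨ w > (ks.length : Int) then []
  else ((PySem.List.slice ks none (some w)).foldl pvStep [([], m)]).map Prod.fst

-- ===== PRECONDITION & SPEC =====
-- Pre_ excludes exactly the inputs on which Python A raises IndexError: ks empty, or
-- the recursion exhausts ks (w outside 1..len ks with no negative budget/bound cutting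
-- the loops off first).
def Pre_all_frequencies_py (w : Int) (m : Int) (ks : List Int) : Prop :=
  ks ≠ [] ∧ (m < 0 ∨ (1 ≤ w ∧ w ≤ (ks.length : Int)) ∨ ∃ x ∈ ks, x < 0)
instance (w : Int) (m : Int) (ks : List Int) : Decidable (Pre_all_frequencies_py w m ks) := by
  unfold Pre_all_frequencies_py; infer_instance

def pvWitness_all_frequencies_py : Int × Int × List Int := (2, 3, [2, 1])

def Spec_all_frequencies_py (w : Int) (m : Int) (ks : List Int) (out : List (List Int)) : Prop := out = all_frequencies_py_alt w m ks
instance (w : Int) (m : Int) (ks : List Int) (out : List (List Int)) : Decidable (Spec_all_frequencies_py w m ks out) := by unfold Spec_all_frequencies_py; infer_instance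

-- ===== CLAIM (what is proved, stated in full; the proofs are below) =====
def Claim_equal_all_frequencies_py : Prop := ∀ (w : Int) (m : Int) (ks : List Int), Dom_all_frequencies_py w m ks → Pre_all_frequencies_py w m ks → Spec_all_frequencies_py w m ks (all_frequencies_py w m ks)

-- ===== LEMMAS AND PROOFS =====

-- full run of B's expansion from a single seed with budget b over bounds
def pvRun (b : Int) : List Int → List (List Int × Int)
  | [] => [([], b)]
  | k :: rest =>
      (PySem.List.pyRange 0 (min b k + 1) 1).flatMap (fun x =>
        (pvRun (min b k - x) rest).map (fun q => (x :: q.1, q.2)))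

-- the foldl of pvStep is the flatMap of independent runs
theorem pvStep_foldl (bounds : List Int) :
    ∀ (frontier : List (List Int × Int)),
      bounds.foldl pvStep frontier =
        frontier.flatMap (fun pb => (pvRun pb.2 bounds).map (fun q => (pb.1 ++ q.1, q.2))) := by
  induction bounds with
  | nil => intro frontier; simp [pvRun]
  | cons k rest ih =>
      intro frontier
      rw [List.foldl_cons, ih]
      simp only [pvStep, pvRun, List.flatMap_assoc, List.flatMap_map, List.map_flatMap,
        List.map_map]
      apply List.flatMap_congr
      intro pb _
      apply List.flatMap_congr
      intro x _
      apply List.map_congr_left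
      intro q _
      simp

-- A equals the mapped run on 1 ≤ w ≤ len ks
theorem pvA_eq_run (ks : List Int) : ∀ (w m : Int), 1 ≤ w → w ≤ (ks.length : Int) →
    all_frequencies_py w m ks = (pvRun m (ks.take w.toNat)).map Prod.fst := by
  induction ks with
  | nil => intro w m h1 h2; simp at h1 h2; omega
  | cons k0 rest ih =>
      intro w m h1 h2
      have htake : (k0 :: rest).take w.toNat = k0 :: rest.take (w - 1).toNat := by
        have : w.toNat = (w - 1).toNat + 1 := by omega
        rw [this, List.take_succ_cons]
      rw [htake]
      by_cases hw : w = 1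
      · subst hw
        simp [all_frequencies_py, pvRun, List.map_flatMap]
      · have h1' : 1 ≤ w - 1 := by omega
        have h2' : w - 1 ≤ (rest.length : Int) := by simp at h2; omega
        simp only [all_frequencies_py, pvRun, List.map_flatMap, List.map_map]
        apply List.flatMap_congr
        intro f0 hf0
        rw [PySem.List.mem_pyRange_one] at hf0
        have hmax : max 0 (min m k0 - f0) = min m k0 - f0 := by omega
        rw [if_neg hw, hmax, ih (w - 1) (min m k0 - f0) h1' h2']
        simp [Function.comp]

-- A returns [] when the recursion is cut off before ks is exhausted
theorem pvA_nil (ks : List Int) : ∀ (w m : Int),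
    (w < 1 ∨ (ks.length : Int) < w) → (m < 0 ∨ ∃ x ∈ ks, x < 0) →
    all_frequencies_py w m ks = [] := by
  induction ks with
  | nil => intro w m _ _; simp [all_frequencies_py]
  | cons k0 rest ih =>
      intro w m hw hcut
      by_cases hneg : min m k0 < 0
      · rw [all_frequencies_py]
        rw [PySem.List.pyRange_one_eq_nil (by omega)]
        simp
      · -- m ≥ 0 and k0 ≥ 0, so the cut lies in rest
        have hm : 0 ≤ m := by omega
        have hrest : ∃ x ∈ rest, x < 0 := by
          rcases hcut with h | ⟨x, hx, hxneg⟩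
          · omega
          · rcases List.mem_cons.mp hx with rfl | hx'
            · omega
            · exact ⟨x, hx', hxneg⟩
        have hw1 : w ≠ 1 := by
          rcases hw with h | h
          · omega
          · simp at h; omega
        have hw' : w - 1 < 1 ∨ (rest.length : Int) < w - 1 := by
          rcases hw with h | h
          · exact Or.inl (by omega)
          · refine Or.inr ?_
            simp only [List.length_cons] at h
            omega
        rw [all_frequencies_py, List.flatMap_eq_nil_iff]
        intro f0 _
        rw [if_neg hw1]
        rw [ih (w - 1) (max 0 (min m k0 - f0)) hw' (Or.inr hrest)]
        simp

-- ===== VERDICT (by name: the statement is the Claim_ definition above) =====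
theorem all_frequencies_py_spec : Claim_equal_all_frequencies_py := by
  intro w m ks _ hpre
  obtain ⟨hne, hcase⟩ := hpre
  unfold Spec_all_frequencies_py all_frequencies_py_alt
  by_cases hin : 1 ≤ w ∧ w ≤ (ks.length : Int)
  · rw [if_neg (by omega)]
    rw [PySem.List.slice_to ks (by omega : (0:Int) ≤ w)]
    rw [pvStep_foldl]
    simp only [List.flatMap_cons, List.flatMap_nil, List.append_nil, List.map_map]
    rw [pvA_eq_run ks w m hin.1 hin.2]
    apply List.map_congr_left
    intro q _
    simp
  · rw [if_pos (by omega)]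
    have hcut : m < 0 ∨ ∃ x ∈ ks, x < 0 := by
      rcases hcase with h | h | h
      · exact Or.inl h
      · exact absurd h hin
      · exact Or.inr h
    exact pvA_nil ks w m (by omega) hcut
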